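-- pv_equiv track=rewrite | github.com/aandresalvarez/flujo | tests/performance_monitor.py | categorize_tests
-- ===== SOURCE A (Python) =====
-- from typing import Dict, List, Tuple
--
-- def categorize_tests(tests: List[Dict[str, str]]) -> Dict[str, List[Dict[str, str]]]:
--     """Categorize tests by type."""
--     categories = {
--         "unit": [],
--         "integration": [],
--         "benchmark": [],
--         "e2e": [],
--         "security": [],
--         "smoke": [],
--         "processors": [],
--     }
--
--     for test in tests:
--         name = test["name"]
--         if "unit/" in name:
--             categories["unit"].append(test)
--         elif "integration/" in name:
--             categories["integration"].append(test)
--         elif "benchmarks/" in name: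
--             categories["benchmark"].append(test)
--         elif "e2e/" in name:
--             categories["e2e"].append(test)
--         elif "security/" in name:
--             categories["security"].append(test)
--         elif "smoke/" in name:
--             categories["smoke"].append(test)
--         elif "processors/" in name:
--             categories["processors"].append(test)
--
--     return categories
-- ===== SOURCE B (Python) =====
-- from typing import Dict, List
--
-- _PAIRS = [
--     ("unit/", "unit"),
--     ("integration/", "integration"),
--     ("benchmarks/", "benchmark"),
--     ("e2e/", "e2e"),
--     ("security/", "security"),
--     ("smoke/", "smoke"),
--     ("processors/", "processors"),
-- ]
--
--
-- def _first_category(name: str):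
--     for sub, cat in _PAIRS:
--         if sub in name:
--             return cat
--     return None
--
--
-- def categorize_tests(tests: List[Dict[str, str]]) -> Dict[str, List[Dict[str, str]]]:
--     """Categorize tests by type (table-driven, per-category filter)."""
--     return {
--         cat: [t for t in tests if _first_category(t["name"]) == cat]
--         for _, cat in _PAIRS
--     }
-- ===== Notes on version B (the rewrite author's own statement) =====
-- stated objective: idiomatic
-- what changed: Replaces the imperative per-test if/elif chain that mutates seven pre-built buckets with a declarative dict comprehension over a priority-ordered (substring, category) table, building each bucket as a filter of the test list by first-matching category.
import Mathlib
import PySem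

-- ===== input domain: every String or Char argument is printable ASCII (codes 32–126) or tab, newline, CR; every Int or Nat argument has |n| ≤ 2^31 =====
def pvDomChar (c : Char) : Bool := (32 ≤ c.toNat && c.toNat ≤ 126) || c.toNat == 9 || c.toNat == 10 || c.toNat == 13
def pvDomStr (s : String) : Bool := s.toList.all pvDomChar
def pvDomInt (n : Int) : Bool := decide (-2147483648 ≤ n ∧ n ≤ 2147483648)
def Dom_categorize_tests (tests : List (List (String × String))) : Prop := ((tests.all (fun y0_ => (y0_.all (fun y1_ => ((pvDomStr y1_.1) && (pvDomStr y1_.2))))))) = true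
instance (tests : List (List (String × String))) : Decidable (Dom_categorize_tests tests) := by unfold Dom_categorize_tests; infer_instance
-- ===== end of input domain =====

-- B replaces A's imperative if/elif chain mutating seven buckets with a table-driven
-- dict comprehension filtering the test list per category (idiomatic; same cost).


-- shared helper: test["name"] (Python raises KeyError when missing; Pre_ guarantees the key,
-- so the default "" is never reached on admitted inputs — exact there)
def pvName (test : List (String × String)) : String :=
  (PySem.Dict.ofList test).getD "name" ""

-- ===== PORT A =====
def pvInitCats : PySem.Dict String (List (List (String × String))) :=
  PySem.Dict.mk [("unit", []), ("integration", []), ("benchmark", []), ("e2e", []),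
                 ("security", []), ("smoke", []), ("processors", [])]

-- one iteration of A's for-loop (name = test["name"]; if/elif chain appending in place)
def pvStepA (categories : PySem.Dict String (List (List (String × String))))
    (test : List (String × String)) : PySem.Dict String (List (List (String × String))) :=
  if PySem.Str.isIn "unit/" (pvName test) then categories.modify "unit" [] (· ++ [test])
  else if PySem.Str.isIn "integration/" (pvName test) then categories.modify "integration" [] (· ++ [test])
  else if PySem.Str.isIn "benchmarks/" (pvName test) then categories.modify "benchmark" [] (· ++ [test])
  else if PySem.Str.isIn "e2e/" (pvName test) then categories.modify "e2e" [] (· ++ [test])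
  else if PySem.Str.isIn "security/" (pvName test) then categories.modify "security" [] (· ++ [test])
  else if PySem.Str.isIn "smoke/" (pvName test) then categories.modify "smoke" [] (· ++ [test])
  else if PySem.Str.isIn "processors/" (pvName test) then categories.modify "processors" [] (· ++ [test])
  else categories

def categorize_tests (tests : List (List (String × String))) : List (String × List (List (String × String))) :=
  (tests.foldl pvStepA pvInitCats).items

-- ===== PORT B =====
def pvPairs : List (String × String) :=
  [("unit/", "unit"), ("integration/", "integration"), ("benchmarks/", "benchmark"),
   ("e2e/", "e2e"), ("security/", "security"), ("smoke/", "smoke"), ("processors/", "processors")]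

-- B's _first_category: first (substring, category) pair whose substring occurs in name
def pvFirstCat (name : String) : Option String :=
  (pvPairs.find? (fun p => PySem.Str.isIn p.1 name)).map (·.2)

def categorize_tests_alt (tests : List (List (String × String))) : List (String × List (List (String × String))) :=
  pvPairs.map (fun p => (p.2, tests.filter (fun t => pvFirstCat (pvName t) == some p.2)))

-- ===== PRECONDITION & SPEC =====
-- Pre_ excludes exactly the inputs containing a test without a "name" key, on which Python A raises KeyError
def Pre_categorize_tests (tests : List (List (String × String))) : Prop :=
  ∀ t ∈ tests, (PySem.Dict.ofList t).contains "name" = true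
instance (tests : List (List (String × String))) : Decidable (Pre_categorize_tests tests) := by
  unfold Pre_categorize_tests; infer_instance

def pvWitness_categorize_tests : (List (List (String × String))) :=
  [[("name", "tests/unit/test_a.py")], [("name", "misc")]]

def Spec_categorize_tests (tests : List (List (String × String))) (out : List (String × List (List (String × String)))) : Prop := out = categorize_tests_alt tests
instance (tests : List (List (String × String))) (out : List (String × List (List (String × String)))) : Decidable (Spec_categorize_tests tests out) := by unfold Spec_categorize_tests; infer_instance

-- ===== CLAIM (what is proved, stated in full; the proofs are below) =====
def Claim_equal_categorize_tests : Prop := ∀ (tests : List (List (String × String))), Dom_categorize_tests tests → Pre_categorize_tests tests → Spec_categorize_tests tests (categorize_tests tests)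

-- ===== LEMMAS AND PROOFS =====

-- the bucket B builds for category c from the list l
def pvBucket (c : String) (l : List (List (String × String))) : List (List (String × String)) :=
  l.filter (fun t => pvFirstCat (pvName t) == some c)

-- A's mutable dict after processing l, expressed through B's buckets
def pvState (l : List (List (String × String))) : PySem.Dict String (List (List (String × String))) :=
  PySem.Dict.mk [("unit", pvBucket "unit" l), ("integration", pvBucket "integration" l),
                 ("benchmark", pvBucket "benchmark" l), ("e2e", pvBucket "e2e" l),
                 ("security", pvBucket "security" l), ("smoke", pvBucket "smoke" l),
                 ("processors", pvBucket "processors" l)]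

lemma pvBucket_append (c : String) (l : List (List (String × String))) (t : List (String × String)) :
    pvBucket c (l ++ [t]) = pvBucket c l ++ (if pvFirstCat (pvName t) == some c then [t] else []) := by
  simp [pvBucket, List.filter_append, List.filter_cons]

-- pvFirstCat evaluated branch by branch, matching A's elif chain
lemma pvFC1 (n : String) (h1 : PySem.Str.isIn "unit/" n = true) :
    pvFirstCat n = some "unit" := by
  simp only [pvFirstCat, pvPairs, List.find?, h1, Option.map]

lemma pvFC2 (n : String) (h1 : ¬ PySem.Str.isIn "unit/" n = true)
    (h2 : PySem.Str.isIn "integration/" n = true) : pvFirstCat n = some "integration" := by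
  rw [Bool.not_eq_true] at h1
  simp only [pvFirstCat, pvPairs, List.find?, h1, h2, Option.map]

lemma pvFC3 (n : String) (h1 : ¬ PySem.Str.isIn "unit/" n = true)
    (h2 : ¬ PySem.Str.isIn "integration/" n = true)
    (h3 : PySem.Str.isIn "benchmarks/" n = true) : pvFirstCat n = some "benchmark" := by
  rw [Bool.not_eq_true] at h1 h2
  simp only [pvFirstCat, pvPairs, List.find?, h1, h2, h3, Option.map]

lemma pvFC4 (n : String) (h1 : ¬ PySem.Str.isIn "unit/" n = true)
    (h2 : ¬ PySem.Str.isIn "integration/" n = true)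
    (h3 : ¬ PySem.Str.isIn "benchmarks/" n = true)
    (h4 : PySem.Str.isIn "e2e/" n = true) : pvFirstCat n = some "e2e" := by
  rw [Bool.not_eq_true] at h1 h2 h3
  simp only [pvFirstCat, pvPairs, List.find?, h1, h2, h3, h4, Option.map]

lemma pvFC5 (n : String) (h1 : ¬ PySem.Str.isIn "unit/" n = true)
    (h2 : ¬ PySem.Str.isIn "integration/" n = true)
    (h3 : ¬ PySem.Str.isIn "benchmarks/" n = true)
    (h4 : ¬ PySem.Str.isIn "e2e/" n = true)
    (h5 : PySem.Str.isIn "security/" n = true) : pvFirstCat n = some "security" := by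
  rw [Bool.not_eq_true] at h1 h2 h3 h4
  simp only [pvFirstCat, pvPairs, List.find?, h1, h2, h3, h4, h5, Option.map]

lemma pvFC6 (n : String) (h1 : ¬ PySem.Str.isIn "unit/" n = true)
    (h2 : ¬ PySem.Str.isIn "integration/" n = true)
    (h3 : ¬ PySem.Str.isIn "benchmarks/" n = true)
    (h4 : ¬ PySem.Str.isIn "e2e/" n = true)
    (h5 : ¬ PySem.Str.isIn "security/" n = true)
    (h6 : PySem.Str.isIn "smoke/" n = true) : pvFirstCat n = some "smoke" := by
  rw [Bool.not_eq_true] at h1 h2 h3 h4 h5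
  simp only [pvFirstCat, pvPairs, List.find?, h1, h2, h3, h4, h5, h6, Option.map]

lemma pvFC7 (n : String) (h1 : ¬ PySem.Str.isIn "unit/" n = true)
    (h2 : ¬ PySem.Str.isIn "integration/" n = true)
    (h3 : ¬ PySem.Str.isIn "benchmarks/" n = true)
    (h4 : ¬ PySem.Str.isIn "e2e/" n = true)
    (h5 : ¬ PySem.Str.isIn "security/" n = true)
    (h6 : ¬ PySem.Str.isIn "smoke/" n = true)
    (h7 : PySem.Str.isIn "processors/" n = true) : pvFirstCat n = some "processors" := by
  rw [Bool.not_eq_true] at h1 h2 h3 h4 h5 h6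
  simp only [pvFirstCat, pvPairs, List.find?, h1, h2, h3, h4, h5, h6, h7, Option.map]

lemma pvFC0 (n : String) (h1 : ¬ PySem.Str.isIn "unit/" n = true)
    (h2 : ¬ PySem.Str.isIn "integration/" n = true)
    (h3 : ¬ PySem.Str.isIn "benchmarks/" n = true)
    (h4 : ¬ PySem.Str.isIn "e2e/" n = true)
    (h5 : ¬ PySem.Str.isIn "security/" n = true)
    (h6 : ¬ PySem.Str.isIn "smoke/" n = true)
    (h7 : ¬ PySem.Str.isIn "processors/" n = true) : pvFirstCat n = none := by
  rw [Bool.not_eq_true] at h1 h2 h3 h4 h5 h6 h7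
  simp only [pvFirstCat, pvPairs, List.find?, h1, h2, h3, h4, h5, h6, h7, Option.map]

lemma pvStepA_state (l : List (List (String × String))) (t : List (String × String)) :
    pvStepA (pvState l) t = pvState (l ++ [t]) := by
  unfold pvStepA
  conv_rhs => rw [pvState]
  simp only [pvBucket_append]
  by_cases h1 : PySem.Str.isIn "unit/" (pvName t) = true
  · rw [if_pos h1, pvFC1 _ h1]
    simp [pvState, PySem.Dict.modify, PySem.Dict.contains, PySem.Dict.get?, PySem.Dict.getD, PySem.Dict.insert]
  rw [if_neg h1]
  by_cases h2 : PySem.Str.isIn "integration/" (pvName t) = true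
  · rw [if_pos h2, pvFC2 _ h1 h2]
    simp [pvState, PySem.Dict.modify, PySem.Dict.contains, PySem.Dict.get?, PySem.Dict.getD, PySem.Dict.insert]
  rw [if_neg h2]
  by_cases h3 : PySem.Str.isIn "benchmarks/" (pvName t) = true
  · rw [if_pos h3, pvFC3 _ h1 h2 h3]
    simp [pvState, PySem.Dict.modify, PySem.Dict.contains, PySem.Dict.get?, PySem.Dict.getD, PySem.Dict.insert]
  rw [if_neg h3]
  by_cases h4 : PySem.Str.isIn "e2e/" (pvName t) = true
  · rw [if_pos h4, pvFC4 _ h1 h2 h3 h4]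
    simp [pvState, PySem.Dict.modify, PySem.Dict.contains, PySem.Dict.get?, PySem.Dict.getD, PySem.Dict.insert]
  rw [if_neg h4]
  by_cases h5 : PySem.Str.isIn "security/" (pvName t) = true
  · rw [if_pos h5, pvFC5 _ h1 h2 h3 h4 h5]
    simp [pvState, PySem.Dict.modify, PySem.Dict.contains, PySem.Dict.get?, PySem.Dict.getD, PySem.Dict.insert]
  rw [if_neg h5]
  by_cases h6 : PySem.Str.isIn "smoke/" (pvName t) = true
  · rw [if_pos h6, pvFC6 _ h1 h2 h3 h4 h5 h6]
    simp [pvState, PySem.Dict.modify, PySem.Dict.contains, PySem.Dict.get?, PySem.Dict.getD, PySem.Dict.insert]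
  rw [if_neg h6]
  by_cases h7 : PySem.Str.isIn "processors/" (pvName t) = true
  · rw [if_pos h7, pvFC7 _ h1 h2 h3 h4 h5 h6 h7]
    simp [pvState, PySem.Dict.modify, PySem.Dict.contains, PySem.Dict.get?, PySem.Dict.getD, PySem.Dict.insert]
  rw [if_neg h7, pvFC0 _ h1 h2 h3 h4 h5 h6 h7]
  simp [pvState]

lemma pvFold_state (ts : List (List (String × String))) :
    ∀ l, ts.foldl pvStepA (pvState l) = pvState (l ++ ts) := by
  induction ts with
  | nil => intro l; simp
  | cons t ts ih =>
      intro l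
      rw [List.foldl_cons, pvStepA_state, ih]
      simp

-- ===== VERDICT (by name: the statement is the Claim_ definition above) =====
theorem categorize_tests_spec : Claim_equal_categorize_tests := by
  intro tests _hdom _hpre
  show categorize_tests tests = categorize_tests_alt tests
  unfold categorize_tests
  rw [show pvInitCats = pvState [] from rfl, pvFold_state, List.nil_append]
  rfl
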